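-- pv_equiv track=rewrite | github.com/9046balaji/screen-monitoring | app.py | _compute_streak_over_rows
-- ===== SOURCE A (Python) =====
-- def _compute_streak_over_rows(rows):
--     longest = 0
--     current = 0
--     for r in rows:
--         if r.get('success'):
--             current += 1
--             longest = max(longest, current)
--         else:
--             current = 0
--     return longest
-- ===== SOURCE B (Python) =====
-- from itertools import groupby
--
-- def _compute_streak_over_rows(rows):
--     runs = [sum(1 for _ in g)
--             for k, g in groupby(rows, key=lambda r: bool(r.get('success')))
--             if k]
--     return max(runs, default=0)
-- ===== Notes on version B (the rewrite author's own statement) =====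
-- stated objective: idiomatic
-- what changed: Replaces the running-counter loop with explicit reset branch by itertools.groupby on the rows' success truthiness: split into maximal consecutive runs, then take the max length among the truthy runs with default 0.
import Mathlib
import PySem

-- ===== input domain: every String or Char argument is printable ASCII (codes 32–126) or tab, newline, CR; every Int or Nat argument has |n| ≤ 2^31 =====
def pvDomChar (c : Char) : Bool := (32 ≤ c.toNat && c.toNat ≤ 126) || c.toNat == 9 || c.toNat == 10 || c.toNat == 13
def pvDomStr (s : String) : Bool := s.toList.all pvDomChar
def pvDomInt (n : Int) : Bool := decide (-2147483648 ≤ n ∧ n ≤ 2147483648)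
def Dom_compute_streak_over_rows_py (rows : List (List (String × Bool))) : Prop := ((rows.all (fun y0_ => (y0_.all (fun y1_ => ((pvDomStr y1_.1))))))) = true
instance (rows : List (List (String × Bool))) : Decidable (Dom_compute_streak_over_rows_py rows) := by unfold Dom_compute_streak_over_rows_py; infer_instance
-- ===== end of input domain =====

-- B replaces A's running counter with explicit reset by grouping rows into maximal
-- consecutive runs of equal success-truthiness and taking the max truthy run length (objective: idiomatic).

-- truthiness of r.get('success'): first match in the assoc list, None/absent is falsy
def pvSucc (r : List (String × Bool)) : Bool :=
  match r.lookup "success" with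
  | some b => b
  | none => false

-- ===== PORT A =====
def compute_streak_over_rows_py (rows : List (List (String × Bool))) : Int :=
  (rows.foldl
    (fun (s : Int × Int) r =>
      if pvSucc r then (max s.1 (s.2 + 1), s.2 + 1) else (s.1, 0))
    (0, 0)).1

-- ===== PORT B =====
-- itertools.groupby: maximal runs of equal keys, as (key, run length)
def pvRuns : List Bool → List (Bool × Nat)
  | [] => []
  | b :: bs =>
    match pvRuns bs with
    | (k, n) :: rest => if b = k then (k, n + 1) :: rest else (b, 1) :: (k, n) :: rest
    | [] => [(b, 1)]

def compute_streak_over_rows_py_alt (rows : List (List (String × Bool))) : Int :=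
  (((pvRuns (rows.map pvSucc)).filterMap
      (fun p => if p.1 then some (p.2 : Int) else none)).foldl max 0)

-- ===== PRECONDITION & SPEC =====
def Spec_compute_streak_over_rows_py (rows : List (List (String × Bool))) (out : Int) : Prop := out = compute_streak_over_rows_py_alt rows
instance (rows : List (List (String × Bool))) (out : Int) : Decidable (Spec_compute_streak_over_rows_py rows out) := by unfold Spec_compute_streak_over_rows_py; infer_instance

-- ===== CLAIM (what is proved, stated in full; the proofs are below) =====
def Claim_equal_compute_streak_over_rows_py : Prop := ∀ (rows : List (List (String × Bool))), Dom_compute_streak_over_rows_py rows → Spec_compute_streak_over_rows_py rows (compute_streak_over_rows_py rows)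

-- ===== LEMMAS AND PROOFS =====

-- A's fold over the list of truthiness keys
def pvFoldA (xs : List Bool) (s : Int × Int) : Int × Int :=
  xs.foldl (fun s b => if b then (max s.1 (s.2 + 1), s.2 + 1) else (s.1, 0)) s

-- best streak contributed by a run list, given C trues immediately before it
def pvVal (C : Int) : List (Bool × Nat) → Int
  | [] => 0
  | (true, n) :: rest => max (C + n) (pvVal 0 rest)
  | (false, _) :: rest => pvVal 0 rest

theorem pvFoldA_eq (xs : List Bool) : ∀ (L C : Int), 0 ≤ L → 0 ≤ C →
    (pvFoldA xs (L, C)).1 = max L (pvVal C (pvRuns xs)) := by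
  induction xs with
  | nil => intro L C hL _; simp [pvFoldA, pvRuns, pvVal]; omega
  | cons b bs ih =>
    intro L C hL hC
    have hstep : (pvFoldA (b :: bs) (L, C)).1
        = (pvFoldA bs (if b then (max L (C + 1), C + 1) else (L, 0))).1 := by
      simp [pvFoldA, List.foldl_cons]
    cases b with
    | true =>
      rw [hstep]
      simp only [if_true]
      rw [ih (max L (C + 1)) (C + 1) (by omega) (by omega)]
      match hr : pvRuns bs with
      | [] => simp [pvRuns, hr, pvVal]
      | (true, n) :: rest =>
        simp [pvRuns, hr, pvVal]
        omega
      | (false, n) :: rest =>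
        simp [pvRuns, hr, pvVal]
    | false =>
      rw [hstep]
      simp only [Bool.false_eq_true, if_false]
      rw [ih L 0 hL le_rfl]
      match hr : pvRuns bs with
      | [] => simp [pvRuns, hr, pvVal]
      | (true, n) :: rest => simp [pvRuns, hr, pvVal]
      | (false, n) :: rest => simp [pvRuns, hr, pvVal]

theorem pvMaxRuns_eq (runs : List (Bool × Nat)) : ∀ (a : Int), 0 ≤ a →
    (runs.filterMap (fun p => if p.1 then some (p.2 : Int) else none)).foldl max a
      = max a (pvVal 0 runs) := by
  induction runs with
  | nil => intro a ha; simp [pvVal]; omega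
  | cons p rest ih =>
    intro a ha
    match p with
    | (true, n) =>
      simp only [List.filterMap_cons, if_true, List.foldl_cons]
      rw [ih (max a n) (by positivity)]
      simp [pvVal]
    | (false, n) =>
      simp only [List.filterMap_cons, Bool.false_eq_true, if_false, pvVal]
      exact ih a ha

-- ===== VERDICT (by name: the statement is the Claim_ definition above) =====
theorem compute_streak_over_rows_py_spec : Claim_equal_compute_streak_over_rows_py := by
  intro rows _
  unfold Spec_compute_streak_over_rows_py compute_streak_over_rows_py compute_streak_over_rows_py_alt
  have hA : (rows.foldl
      (fun (s : Int × Int) r =>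
        if pvSucc r then (max s.1 (s.2 + 1), s.2 + 1) else (s.1, 0)) (0, 0))
      = pvFoldA (rows.map pvSucc) (0, 0) := by
    simp [pvFoldA, List.foldl_map]
  rw [hA, pvFoldA_eq (rows.map pvSucc) 0 0 le_rfl le_rfl,
    pvMaxRuns_eq (pvRuns (rows.map pvSucc)) 0 le_rfl]
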